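-- pv_equiv track=rewrite | github.com/MinChihHsu/emergency-data-collector | scripts/process_logs.py | extract_scenario_number
-- ===== SOURCE A (Python) =====
-- def extract_scenario_number(base_name):
--     """
--     Extract scenario number from base name.
--     Format: {country}_{operator}_{model}_{deviceId}_{date}_{scenario}_{experiment}_{time}_{location}
--     Example: US_T-Mobile_Pixel9_2e7b6568558a706f_20260204_1_1_164417_n42.710147_w84.458661
--                                                                       ^ scenario number
--     """
--     parts = base_name.split('_')
--     # Scenario number is typically at index -5 (before experiment number, time, location)
--     # Format: ..._date_scenario_experiment_time_location
--     try:
--         # Find the date part (8 digits starting with 20)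
--         for i, part in enumerate(parts):
--             if len(part) == 8 and part.startswith('20'):
--                 # Scenario is next part after date
--                 if i + 1 < len(parts):
--                     return int(parts[i + 1])
--         return None
--     except (ValueError, IndexError):
--         return None
-- ===== SOURCE B (Python) =====
-- import re
--
-- # One regex search instead of split+enumerate: a date token is an 8-char '_'-free
-- # run starting with '20' that sits at the start or right after '_' and is followed
-- # by '_'; the capture is the very next '_'-free token.
-- _DATE_RE = re.compile(r'(?:^|_)20[^_]{6}_([^_]*)')
--
--
-- def extract_scenario_number(base_name):
--     m = _DATE_RE.search(base_name)
--     if m is None: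
--         return None
--     try:
--         return int(m.group(1))
--     except ValueError:
--         return None
-- ===== Notes on version B (the rewrite author's own statement) =====
-- stated objective: idiomatic
-- what changed: Replaced the split('_')+enumerate scan over a parts list by a single compiled-regex search r'(?:^|_)20[^_]{6}_([^_]*)' over the raw string, converting the first captured token with int().
import Mathlib
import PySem

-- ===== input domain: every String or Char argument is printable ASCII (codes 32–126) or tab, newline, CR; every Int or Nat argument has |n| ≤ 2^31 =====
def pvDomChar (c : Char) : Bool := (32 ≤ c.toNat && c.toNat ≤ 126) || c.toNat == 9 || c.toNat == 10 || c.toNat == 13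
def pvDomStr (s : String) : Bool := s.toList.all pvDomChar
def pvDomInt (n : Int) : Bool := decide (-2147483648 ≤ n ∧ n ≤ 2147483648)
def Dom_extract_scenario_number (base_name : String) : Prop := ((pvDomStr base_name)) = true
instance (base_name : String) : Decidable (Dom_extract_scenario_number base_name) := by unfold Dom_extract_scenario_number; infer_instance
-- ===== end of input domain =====

-- B replaces A's split('_')+enumerate scan by a single left-to-right regex-style search
-- for the pattern (?:^|_)20[^_]{6}_([^_]*) over the raw string (objective: idiomatic).

-- ===== PORT A =====
-- the 'for i, part in enumerate(parts)' loop; i is the running enumerate index,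
-- full is the whole parts list (for the i+1 < len(parts) check and parts[i+1])
def pvLoopA (full : List (List Char)) : Nat → List (List Char) → Option Int
  | _, [] => none                                   -- loop falls through: return None
  | i, part :: rest =>
    if PySem.Chars.len part = 8 ∧ PySem.Chars.startswith part ['2', '0'] = true then
      if (i : Int) + 1 < (full.length : Int) then
        match PySem.List.pyGet? full ((i : Int) + 1) with
        | some q => PySem.Int.ofChars? q            -- int(parts[i+1]); ValueError → except → None
        | none => none                              -- unreachable (index checked in range)
      else pvLoopA full (i + 1) rest
    else pvLoopA full (i + 1) rest

def extract_scenario_number (base_name : String) : Option Int :=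
  -- parts = base_name.split('_')  (separator '_' is nonempty, so split never raises)
  let parts := PySem.Chars.splitOn base_name.toList ['_']
  pvLoopA parts 0 parts

-- ===== PORT B =====
-- Hand port of re.search for the FIXED pattern r'(?:^|_)20[^_]{6}_([^_]*)':
-- exact for this pattern (no backtracking is possible past the literal '20' and
-- the capture [^_]* is the maximal '_'-free run, i.e. takeWhile (· ≠ '_')).

-- after the literal '20': consume n chars ≠ '_', then a literal '_', then capture [^_]*
def pvMatchBody : Nat → List Char → Option (List Char)
  | 0, c :: rest => if c = '_' then some (rest.takeWhile (· ≠ '_')) else none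
  | 0, [] => none
  | n + 1, c :: rest => if c = '_' then none else pvMatchBody n rest
  | _ + 1, [] => none

-- try to match 20[^_]{6}_([^_]*) at the current position
def pvMatchDate (cs : List Char) : Option (List Char) :=
  match cs with
  | a :: b :: rest => if a = '2' then (if b = '0' then pvMatchBody 6 rest else none) else none
  | _ => none

-- re.search: try the match at every position allowed by (?:^|_), left to right;
-- atBoundary is true at position 0 and right after each '_'
def pvSearch : List Char → Bool → Option (List Char)
  | [], _ => none
  | c :: rest, atBoundary =>
    match (if atBoundary then pvMatchDate (c :: rest) else none) with
    | some cap => some cap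
    | none => pvSearch rest (c == '_')

def extract_scenario_number_alt (base_name : String) : Option Int :=
  match pvSearch base_name.toList true with
  | none => none                                    -- no match: return None
  | some cap => PySem.Int.ofChars? cap              -- int(m.group(1)); ValueError → None

-- ===== PRECONDITION & SPEC =====
def Spec_extract_scenario_number (base_name : String) (out : Option Int) : Prop := out = extract_scenario_number_alt base_name
instance (base_name : String) (out : Option Int) : Decidable (Spec_extract_scenario_number base_name out) := by unfold Spec_extract_scenario_number; infer_instance

-- ===== CLAIM (what is proved, stated in full; the proofs are below) =====
def Claim_equal_extract_scenario_number : Prop := ∀ (base_name : String), Dom_extract_scenario_number base_name → Spec_extract_scenario_number base_name (extract_scenario_number base_name)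

-- ===== LEMMAS AND PROOFS =====

-- reference splitter: the segments of cs between '_' separators, in order
def pvSegs : List Char → List (List Char)
  | [] => [[]]
  | c :: rest =>
    if c = '_' then [] :: pvSegs rest
    else match pvSegs rest with
      | [] => [[c]]          -- unreachable: pvSegs is never []
      | p :: ps => (c :: p) :: ps

-- A's loop, recast as plain structural recursion on the remaining parts
def pvFA : List (List Char) → Option Int
  | [] => none
  | p :: rest =>
    if p.length = 8 ∧ ['2', '0'] <+: p then
      match rest with
      | [] => none
      | q :: _ => PySem.Int.ofChars? q
    else pvFA rest

def pvConsFirst (pre : List Char) : List (List Char) → List (List Char)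
  | [] => [pre]
  | p :: ps => (pre ++ p) :: ps

theorem pvSegs_ne_nil (cs : List Char) : pvSegs cs ≠ [] := by
  cases cs with
  | nil => simp [pvSegs]
  | cons c rest =>
    simp only [pvSegs]
    split <;> [simp; split <;> simp]

theorem pvSegs_head (cs : List Char) :
    ∃ ps, pvSegs cs = cs.takeWhile (· ≠ '_') :: ps := by
  induction cs with
  | nil => exact ⟨[], rfl⟩
  | cons c rest ih =>
    obtain ⟨ps, hps⟩ := ih
    by_cases hc : c = '_'
    · subst hc; exact ⟨pvSegs rest, by simp [pvSegs, List.takeWhile]⟩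
    · refine ⟨ps, ?_⟩
      simp [pvSegs, hc, hps]

theorem pvSegs_no_under {cs : List Char} (h : '_' ∉ cs) : pvSegs cs = [cs] := by
  induction cs with
  | nil => rfl
  | cons c rest ih =>
    have hc : c ≠ '_' := fun hc => h (hc ▸ List.mem_cons_self)
    have hrest : '_' ∉ rest := fun hm => h (List.mem_cons_of_mem _ hm)
    simp [pvSegs, hc, ih hrest]

theorem pvSegs_append {p : List Char} (h : '_' ∉ p) (r : List Char) :
    pvSegs (p ++ '_' :: r) = p :: pvSegs r := by
  induction p with
  | nil => simp [pvSegs]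
  | cons c p' ih =>
    have hc : c ≠ '_' := fun hc => h (hc ▸ List.mem_cons_self)
    have hp' : '_' ∉ p' := fun hm => h (List.mem_cons_of_mem _ hm)
    simp only [List.cons_append, pvSegs, if_neg hc, ih hp']

-- splitOn.go computes pvSegs (invariant over the fuel/accumulator recursion)
theorem pv_go_inv : ∀ (fuel : Nat) (l cur : List Char) (acc : List (List Char)),
    l.length < fuel →
    PySem.Chars.splitOn.go ['_'] fuel l cur acc = acc.reverse ++ pvConsFirst cur.reverse (pvSegs l) := by
  intro fuel
  induction fuel with
  | zero => intro l cur acc h; omega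
  | succ f ih =>
    intro l cur acc h
    cases l with
    | nil =>
      simp [PySem.Chars.splitOn.go, pvSegs, pvConsFirst]
    | cons c rest =>
      simp only [PySem.Chars.splitOn.go]
      by_cases hc : c = '_'
      · subst hc
        have hpre : List.isPrefixOf ['_'] ('_' :: rest) = true := by simp [List.isPrefixOf]
        rw [if_pos hpre, ih _ _ _ (by simpa using Nat.lt_of_succ_lt_succ h)]
        obtain ⟨ps, hps⟩ := pvSegs_head rest
        simp [pvSegs, pvConsFirst, hps]
      · have hpre : List.isPrefixOf ['_'] (c :: rest) = false := by
          simp [List.isPrefixOf]; exact fun hh => (hc hh.symm).elim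
        rw [if_neg (by simp [hpre]), ih _ _ _ (by simpa using Nat.lt_of_succ_lt_succ h)]
        obtain ⟨ps, hps⟩ := pvSegs_head rest
        cases hr : pvSegs rest with
        | nil => exact absurd hr (pvSegs_ne_nil rest)
        | cons p psr =>
          simp [pvSegs, hc, hr, pvConsFirst]

theorem pv_splitOn_eq_segs (cs : List Char) :
    PySem.Chars.splitOn cs ['_'] = pvSegs cs := by
  show PySem.Chars.splitOn.go ['_'] (cs.length + 1) cs [] [] = _
  rw [pv_go_inv (cs.length + 1) cs [] [] (Nat.lt_succ_self _)]
  cases hr : pvSegs cs with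
  | nil => exact absurd hr (pvSegs_ne_nil cs)
  | cons p ps => simp [pvConsFirst]

-- the indexed loop equals the structural recursion pvFA
theorem pvLoopA_eq : ∀ (l : List (List Char)) (i : Nat) (full : List (List Char)),
    full.drop i = l → pvLoopA full i l = pvFA l := by
  intro l
  induction l with
  | nil => intro i full _; rfl
  | cons p rest ih =>
    intro i full hdrop
    have hi : i < full.length := by
      by_contra hge
      simp [List.drop_eq_nil_of_le (Nat.le_of_not_lt hge)] at hdrop
    have hlen : full.length = i + 1 + rest.length := by
      have := congrArg List.length hdrop
      simp [List.length_drop] at this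
      omega
    have hdrop' : full.drop (i + 1) = rest := by
      rw [← List.tail_drop, hdrop]
      rfl
    simp only [pvLoopA, pvFA, PySem.Chars.len_eq, PySem.Chars.startswith_iff]
    by_cases hcond : p.length = (8 : Nat) ∧ ['2', '0'] <+: p
    · have hcond' : (p.length : Int) = (8 : Int) ∧ ['2', '0'] <+: p :=
        ⟨by exact_mod_cast hcond.1, hcond.2⟩
      rw [if_pos hcond', if_pos hcond]
      cases rest with
      | nil =>
        have : ¬ ((i : Int) + 1 < (full.length : Int)) := by
          rw [hlen]; push_cast [List.length_nil]; omega
        rw [if_neg this]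
        rfl
      | cons q rest' =>
        have hlt : (i : Int) + 1 < (full.length : Int) := by
          rw [hlen]; push_cast [List.length_cons]; omega
        rw [if_pos hlt]
        have hget : PySem.List.pyGet? full ((i : Int) + 1) = some q := by
          have h1 : ((i : Int) + 1) = ((i + 1 : Nat) : Int) := by push_cast; ring
          rw [h1, PySem.List.pyGet?_natCast]
          have h3 := congrArg (fun t => t[0]?) hdrop'
          simpa [List.getElem?_drop] using h3
        rw [hget]
    · have hcond' : ¬ ((p.length : Int) = (8 : Int) ∧ ['2', '0'] <+: p) := by
        intro hc; exact hcond ⟨by exact_mod_cast hc.1, hc.2⟩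
      rw [if_neg hcond', if_neg hcond]
      exact ih (i + 1) full hdrop'

theorem pvMatchBody_some_mem {n : Nat} {cs cap : List Char}
    (h : pvMatchBody n cs = some cap) : '_' ∈ cs := by
  induction n generalizing cs with
  | zero =>
    cases cs with
    | nil => simp [pvMatchBody] at h
    | cons c rest =>
      by_cases hc : c = '_'
      · exact hc ▸ List.mem_cons_self
      · simp [pvMatchBody, hc] at h
  | succ n ih =>
    cases cs with
    | nil => simp [pvMatchBody] at h
    | cons c rest =>
      by_cases hc : c = '_'
      · simp [pvMatchBody, hc] at h
      · simp only [pvMatchBody, if_neg hc] at h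
        exact List.mem_cons_of_mem _ (ih h)

theorem pvMatchDate_some_mem {cs cap : List Char}
    (h : pvMatchDate cs = some cap) : '_' ∈ cs := by
  match cs with
  | [] => simp [pvMatchDate] at h
  | [a] => simp [pvMatchDate] at h
  | a :: b :: rest =>
    by_cases ha : a = '2'
    · by_cases hb : b = '0'
      · simp only [pvMatchDate, if_pos ha, if_pos hb] at h
        exact List.mem_cons_of_mem _ (List.mem_cons_of_mem _ (pvMatchBody_some_mem h))
      · simp [pvMatchDate, ha, hb] at h
    · simp [pvMatchDate, ha] at h

theorem pvSearch_no_under {cs : List Char} (h : '_' ∉ cs) (b : Bool) :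
    pvSearch cs b = none := by
  induction cs generalizing b with
  | nil => rfl
  | cons c rest ih =>
    have hrest : '_' ∉ rest := fun hm => h (List.mem_cons_of_mem _ hm)
    simp only [pvSearch]
    have hmd : (if b then pvMatchDate (c :: rest) else none) = none := by
      cases b with
      | false => rfl
      | true =>
        simp only [if_pos]
        cases hm : pvMatchDate (c :: rest) with
        | none => rfl
        | some cap => exact absurd (pvMatchDate_some_mem hm) h
    rw [hmd]
    exact ih hrest _

theorem pvSearch_skip {p : List Char} (h : '_' ∉ p) (r : List Char) :
    pvSearch (p ++ '_' :: r) false = pvSearch r true := by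
  induction p with
  | nil => simp [pvSearch]
  | cons c p' ih =>
    have hc : c ≠ '_' := fun hc => h (hc ▸ List.mem_cons_self)
    have hp' : '_' ∉ p' := fun hm => h (List.mem_cons_of_mem _ hm)
    simp only [List.cons_append, pvSearch]
    rw [if_neg Bool.false_ne_true]
    simp only [beq_eq_false_iff_ne.mpr hc]
    exact ih hp'

theorem pvMatchBody_append {p : List Char} (h : '_' ∉ p) (r : List Char) (n : Nat) :
    pvMatchBody n (p ++ '_' :: r) =
      if p.length = n then some (r.takeWhile (· ≠ '_')) else none := by
  induction n generalizing p with
  | zero =>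
    cases p with
    | nil => simp [pvMatchBody]
    | cons c p' =>
      have hc : c ≠ '_' := fun hc => h (hc ▸ List.mem_cons_self)
      simp [pvMatchBody, hc]
  | succ n ih =>
    cases p with
    | nil => simp [pvMatchBody]
    | cons c p' =>
      have hc : c ≠ '_' := fun hc => h (hc ▸ List.mem_cons_self)
      have hp' : '_' ∉ p' := fun hm => h (List.mem_cons_of_mem _ hm)
      simp only [List.cons_append, pvMatchBody, if_neg hc, ih hp']
      simp [List.length_cons]

theorem pvMatchDate_append {p : List Char} (h : '_' ∉ p) (r : List Char) :
    pvMatchDate (p ++ '_' :: r) =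
      if p.length = 8 ∧ ['2', '0'] <+: p then some (r.takeWhile (· ≠ '_')) else none := by
  match p, h with
  | [], _ => cases r <;> simp [pvMatchDate]
  | [a], h =>
    have ha : a ≠ '_' := fun hc => h (hc ▸ List.mem_cons_self)
    by_cases h2 : a = '2' <;> simp [pvMatchDate, h2]
  | a :: b :: p', h =>
    have hp' : '_' ∉ p' := fun hm =>
      h (List.mem_cons_of_mem _ (List.mem_cons_of_mem _ hm))
    by_cases ha : a = '2'
    · by_cases hb : b = '0'
      · simp only [List.cons_append, pvMatchDate, if_pos ha, if_pos hb,
          pvMatchBody_append hp' r 6]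
        subst ha; subst hb
        by_cases hl : p'.length = 6
        · simp [hl, List.cons_prefix_cons]
        · have : ¬ ((p'.length + 1 + 1 = 8) ∧ ['2', '0'] <+: '2' :: '0' :: p') := by
            intro hc; exact hl (by omega)
          simp only [List.length_cons]
          rw [if_neg hl, if_neg this]
      · have : ¬ ((a :: b :: p').length = 8 ∧ ['2', '0'] <+: a :: b :: p') := by
          intro hc
          rcases hc.2 with ⟨t, ht⟩
          simp at ht
          exact hb ht.2.1.symm
        simp only [List.cons_append, pvMatchDate, if_pos ha, if_neg hb]
        rw [if_neg this]
    · have : ¬ ((a :: b :: p').length = 8 ∧ ['2', '0'] <+: a :: b :: p') := by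
        intro hc
        rcases hc.2 with ⟨t, ht⟩
        simp at ht
        exact ha ht.1.symm
      simp only [List.cons_append, pvMatchDate, if_neg ha]
      rw [if_neg this]

theorem pvSearch_boundary {p : List Char} (h : '_' ∉ p) (r : List Char) :
    pvSearch (p ++ '_' :: r) true =
      match pvMatchDate (p ++ '_' :: r) with
      | some cap => some cap
      | none => pvSearch r true := by
  cases p with
  | nil => simp [pvSearch]
  | cons c p' =>
    have hc : c ≠ '_' := fun hc => h (hc ▸ List.mem_cons_self)
    have hp' : '_' ∉ p' := fun hm => h (List.mem_cons_of_mem _ hm)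
    simp only [List.cons_append, pvSearch, if_pos]
    cases hm : pvMatchDate (c :: (p' ++ '_' :: r)) with
    | some cap => rfl
    | none =>
      simp only []
      rw [beq_eq_false_iff_ne.mpr hc]
      exact pvSearch_skip hp' r

theorem pv_decomp : ∀ {cs : List Char}, '_' ∈ cs →
    ∃ p r, '_' ∉ p ∧ cs = p ++ '_' :: r := by
  intro cs hu
  induction cs with
  | nil => cases hu
  | cons c rest ih =>
    by_cases hc : c = '_'
    · exact ⟨[], rest, by simp, by simp [hc]⟩
    · have hrest : '_' ∈ rest := by
        rcases List.mem_cons.mp hu with h | h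
        · exact absurd h.symm hc
        · exact h
      obtain ⟨p, r, hp, hr⟩ := ih hrest
      refine ⟨c :: p, r, ?_, by simp [hr]⟩
      intro hm
      rcases List.mem_cons.mp hm with h | h
      · exact hc h.symm
      · exact hp h

-- main bridge: A's recursion over the segments equals B's left-to-right search
theorem pv_main_aux : ∀ (n : Nat) (cs : List Char), cs.length ≤ n →
    pvFA (pvSegs cs) = (pvSearch cs true).bind PySem.Int.ofChars? := by
  intro n
  induction n with
  | zero =>
    intro cs hn
    have : cs = [] := List.eq_nil_of_length_eq_zero (Nat.le_zero.mp hn)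
    subst this
    rfl
  | succ n ih =>
    intro cs hn
    by_cases hu : '_' ∈ cs
    · -- cs = p ++ '_' :: r with p its maximal '_'-free prefix
      obtain ⟨p, r, hpu, hcs⟩ := pv_decomp hu
      have hr : r.length ≤ n := by
        have := congrArg List.length hcs
        simp at this
        omega
      rw [hcs, pvSegs_append hpu, pvSearch_boundary hpu, pvMatchDate_append hpu]
      obtain ⟨ps, hps⟩ := pvSegs_head r
      by_cases hcond : p.length = 8 ∧ ['2', '0'] <+: p
      · rw [if_pos hcond]
        simp only [pvFA, if_pos hcond, hps]
        rfl
      · rw [if_neg hcond]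
        simp only [pvFA, if_neg hcond]
        exact ih r hr
    · rw [pvSegs_no_under hu, pvSearch_no_under hu]
      simp only [pvFA]
      split <;> rfl

theorem pv_main (cs : List Char) :
    pvFA (pvSegs cs) = (pvSearch cs true).bind PySem.Int.ofChars? :=
  pv_main_aux cs.length cs (Nat.le_refl _)

-- ===== VERDICT (by name: the statement is the Claim_ definition above) =====
theorem extract_scenario_number_spec : Claim_equal_extract_scenario_number := by
  intro base_name _
  unfold Spec_extract_scenario_number extract_scenario_number extract_scenario_number_alt
  rw [pv_splitOn_eq_segs, pvLoopA_eq _ 0 _ (by simp), pv_main]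
  cases pvSearch base_name.toList true <;> rfl
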